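-- pv_equiv track=rewrite | github.com/jack-chaudier/mirage | projects/lorien/src/engine/scripts/demo_canon_stories.py | _count_inherited_beliefs
-- ===== SOURCE A (Python) =====
-- def _count_inherited_beliefs(
--     fresh_start: dict[str, dict[str, str]],
--     canon_start: dict[str, dict[str, str]],
-- ) -> int:
--     diffs = 0
--     for agent_id in sorted(set(fresh_start) | set(canon_start)):
--         fresh_claims = fresh_start.get(agent_id, {})
--         canon_claims = canon_start.get(agent_id, {})
--         for claim_id in sorted(set(fresh_claims) | set(canon_claims)):
--             if fresh_claims.get(claim_id) != canon_claims.get(claim_id):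
--                 diffs += 1
--     return diffs
-- ===== SOURCE B (Python) =====
-- def _count_inherited_beliefs(
--     fresh_start: dict[str, dict[str, str]],
--     canon_start: dict[str, dict[str, str]],
-- ) -> int:
--     fresh_triples = {(a, k, v) for a, claims in fresh_start.items() for k, v in claims.items()}
--     canon_triples = {(a, k, v) for a, claims in canon_start.items() for k, v in claims.items()}
--     all_keys = {(a, k) for a, k, _ in fresh_triples} | {(a, k) for a, k, _ in canon_triples}
--     return len(all_keys) - len(fresh_triples & canon_triples)
-- ===== Notes on version B (the rewrite author's own statement) =====
-- stated objective: alternative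
-- what changed: B has no per-agent loop over key unions and no pairwise value comparison: it flattens both nested dicts into sets of (agent, claim, value) triples and returns |distinct (agent, claim) keys| minus |triples present in both sets|, i.e. it counts global agreements once and subtracts them from the key count.
import Mathlib
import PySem

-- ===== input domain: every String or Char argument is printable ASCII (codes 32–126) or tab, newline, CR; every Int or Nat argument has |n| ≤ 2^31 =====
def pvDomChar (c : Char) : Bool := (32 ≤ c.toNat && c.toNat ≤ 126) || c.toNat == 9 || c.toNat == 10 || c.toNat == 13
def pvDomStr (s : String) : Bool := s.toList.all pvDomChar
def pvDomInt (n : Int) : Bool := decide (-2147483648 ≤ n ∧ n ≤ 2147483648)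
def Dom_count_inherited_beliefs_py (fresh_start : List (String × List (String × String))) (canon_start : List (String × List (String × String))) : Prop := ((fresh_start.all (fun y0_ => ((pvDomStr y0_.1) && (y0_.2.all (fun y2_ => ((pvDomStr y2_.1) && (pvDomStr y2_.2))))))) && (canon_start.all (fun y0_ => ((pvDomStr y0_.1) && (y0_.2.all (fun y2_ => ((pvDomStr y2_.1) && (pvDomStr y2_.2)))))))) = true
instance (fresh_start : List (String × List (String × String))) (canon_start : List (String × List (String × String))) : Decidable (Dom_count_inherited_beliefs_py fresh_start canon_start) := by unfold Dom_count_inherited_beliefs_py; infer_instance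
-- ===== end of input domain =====

-- B drops the per-agent union loop and the pairwise value comparison: it flattens both nested dicts
-- into sets of (agent, claim, value) triples and returns |distinct (agent, claim) keys| − |shared triples|.

-- ===== PORT A =====
def count_inherited_beliefs_py (fresh_start : List (String × List (String × String))) (canon_start : List (String × List (String × String))) : Int :=
  let fd := PySem.Dict.mk fresh_start
  let cd := PySem.Dict.mk canon_start
  -- diffs = 0; for agent_id in sorted(set(fresh_start) | set(canon_start)):
  (PySem.List.sorted (PySem.Set.union (PySem.Set.ofList fd.keys) cd.keys) (fun x => x) false).foldl
    (fun diffs agent_id =>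
      let fresh_claims := PySem.Dict.mk (fd.getD agent_id [])
      let canon_claims := PySem.Dict.mk (cd.getD agent_id [])
      -- for claim_id in sorted(set(fresh_claims) | set(canon_claims)):
      (PySem.List.sorted (PySem.Set.union (PySem.Set.ofList fresh_claims.keys) canon_claims.keys) (fun x => x) false).foldl
        (fun d claim_id =>
          if fresh_claims.get? claim_id ≠ canon_claims.get? claim_id then d + 1 else d)
        diffs)
    0

-- ===== PORT B =====
def count_inherited_beliefs_py_alt (fresh_start : List (String × List (String × String))) (canon_start : List (String × List (String × String))) : Int :=
  -- fresh_triples = {(a, k, v) for a, claims in fresh_start.items() for k, v in claims.items()}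
  let fresh_triples : PySem.Set (String × String × String) :=
    PySem.Set.ofList ((PySem.Dict.mk fresh_start).items.flatMap
      (fun p => (PySem.Dict.mk p.2).items.map (fun q => (p.1, q.1, q.2))))
  let canon_triples : PySem.Set (String × String × String) :=
    PySem.Set.ofList ((PySem.Dict.mk canon_start).items.flatMap
      (fun p => (PySem.Dict.mk p.2).items.map (fun q => (p.1, q.1, q.2))))
  -- all_keys = {(a, k) for a, k, _ in fresh_triples} | {(a, k) for a, k, _ in canon_triples}
  let all_keys : PySem.Set (String × String) :=
    PySem.Set.union (PySem.Set.ofList (fresh_triples.map (fun t => (t.1, t.2.1))))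
      (canon_triples.map (fun t => (t.1, t.2.1)))
  -- len(all_keys) - len(fresh_triples & canon_triples)
  (all_keys.length : Int) - ((PySem.Set.inter fresh_triples canon_triples).length : Int)

-- ===== PRECONDITION & SPEC =====
-- Pre_ requires pairwise-distinct keys at both nesting levels: the association-list arguments encode
-- Python dicts, which cannot repeat keys, so no input of the Python function is excluded.
def Pre_count_inherited_beliefs_py (fresh_start : List (String × List (String × String))) (canon_start : List (String × List (String × String))) : Prop :=
  ((fresh_start.map (fun p => p.1)).Nodup ∧ ∀ p ∈ fresh_start, (p.2.map (fun q => q.1)).Nodup) ∧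
  ((canon_start.map (fun p => p.1)).Nodup ∧ ∀ p ∈ canon_start, (p.2.map (fun q => q.1)).Nodup)
instance (fresh_start : List (String × List (String × String))) (canon_start : List (String × List (String × String))) : Decidable (Pre_count_inherited_beliefs_py fresh_start canon_start) := by unfold Pre_count_inherited_beliefs_py; infer_instance

def pvWitness_count_inherited_beliefs_py : (List (String × List (String × String))) × (List (String × List (String × String))) :=
  ([("a", [("x", "1")])], [("a", [("x", "2")]), ("b", [])])

def Spec_count_inherited_beliefs_py (fresh_start : List (String × List (String × String))) (canon_start : List (String × List (String × String))) (out : Int) : Prop := out = count_inherited_beliefs_py_alt fresh_start canon_start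
instance (fresh_start : List (String × List (String × String))) (canon_start : List (String × List (String × String))) (out : Int) : Decidable (Spec_count_inherited_beliefs_py fresh_start canon_start out) := by unfold Spec_count_inherited_beliefs_py; infer_instance

-- ===== CLAIM (what is proved, stated in full; the proofs are below) =====
def Claim_equal_count_inherited_beliefs_py : Prop := ∀ (fresh_start : List (String × List (String × String))) (canon_start : List (String × List (String × String))), Dom_count_inherited_beliefs_py fresh_start canon_start → Pre_count_inherited_beliefs_py fresh_start canon_start → Spec_count_inherited_beliefs_py fresh_start canon_start (count_inherited_beliefs_py fresh_start canon_start)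

-- ===== LEMMAS AND PROOFS =====

def pvF (xs : List (String × List (String × String))) (a : String) : PySem.Dict String String :=
  PySem.Dict.mk ((PySem.Dict.mk xs).getD a [])

lemma pvF_keys_nodup (xs : List (String × List (String × String)))
    (hin : ∀ p ∈ xs, (p.2.map (fun q => q.1)).Nodup) (a : String) : (pvF xs a).keys.Nodup := by
  unfold pvF
  rw [PySem.Dict.getD_eq_get?_getD]
  cases h : (PySem.Dict.mk xs).get? a with
  | none => simp [PySem.Dict.keys]
  | some cl =>
    have hm : (a, cl) ∈ (PySem.Dict.mk xs).items := PySem.Dict.mem_items_of_get?_eq_some _ h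
    exact hin (a, cl) hm

lemma pvF_empty_of_not_mem (xs : List (String × List (String × String))) (a : String)
    (h : a ∉ xs.map (fun p => p.1)) : (pvF xs a).items = [] := by
  unfold pvF
  rw [PySem.Dict.getD_eq_get?_getD, (PySem.Dict.get?_eq_none_iff_not_mem_keys _ _).2 h]
  rfl

lemma pvF_eq_of_mem (xs : List (String × List (String × String)))
    (hk : (xs.map (fun p => p.1)).Nodup) (p : String × List (String × String)) (hp : p ∈ xs) :
    (PySem.Dict.mk xs).getD p.1 [] = p.2 := by
  rw [PySem.Dict.getD_eq_get?_getD, PySem.Dict.get?_of_mem_items _ hp hk]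
  rfl

def pvTri (xs : List (String × List (String × String))) : List (String × String × String) :=
  (PySem.Dict.mk xs).items.flatMap (fun p => (PySem.Dict.mk p.2).items.map (fun q => (p.1, q.1, q.2)))

lemma pvTri_eq (xs : List (String × List (String × String)))
    (hk : (xs.map (fun p => p.1)).Nodup) :
    pvTri xs = (xs.map (fun p => p.1)).flatMap (fun a => (pvF xs a).items.map (fun q => (a, q.1, q.2))) := by
  unfold pvTri
  rw [List.flatMap_def, List.flatMap_def, List.map_map]
  congr 1
  apply List.map_congr_left
  intro p hp
  simp only [Function.comp]
  have : (pvF xs p.1).items = (PySem.Dict.mk p.2).items := by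
    unfold pvF
    rw [pvF_eq_of_mem xs hk p hp]
  rw [this]

lemma pv_mem_tri (xs : List (String × List (String × String)))
    (hk : (xs.map (fun p => p.1)).Nodup)
    (hin : ∀ p ∈ xs, (p.2.map (fun q => q.1)).Nodup)
    (t : String × String × String) :
    t ∈ pvTri xs ↔ (pvF xs t.1).get? t.2.1 = some t.2.2 := by
  rw [pvTri_eq xs hk]
  simp only [List.mem_flatMap, List.mem_map]
  constructor
  · rintro ⟨a, ha, q, hq, rfl⟩
    have hnd : (pvF xs a).keys.Nodup := pvF_keys_nodup xs hin a
    exact PySem.Dict.get?_of_mem_items _ hq hnd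
  · intro h
    refine ⟨t.1, ?_, (t.2.1, t.2.2), PySem.Dict.mem_items_of_get?_eq_some _ h, rfl⟩
    by_contra hmem0
    have hmem : t.1 ∉ xs.map (fun p => p.1) := by simpa using hmem0
    have : (pvF xs t.1).items = [] := pvF_empty_of_not_mem xs t.1 hmem
    have := PySem.Dict.mem_items_of_get?_eq_some _ h
    simp_all

lemma pv_nodup_tag {β : Type} (l : List String) (f : String → List β)
    (hl : l.Nodup) (hf : ∀ a ∈ l, (f a).Nodup) :
    (l.flatMap (fun a => (f a).map (fun b => (a, b)))).Nodup := by
  induction l with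
  | nil => simp
  | cons a l ih =>
    rw [List.flatMap_cons]
    apply List.Nodup.append
    · exact List.Nodup.map (fun b c h => by simpa using congrArg Prod.snd h) (hf a (by simp))
    · exact ih (List.Nodup.of_cons hl) (fun x hx => hf x (by simp [hx]))
    · intro x hx1 hx2
      obtain ⟨b, _, rfl⟩ := List.mem_map.1 hx1
      obtain ⟨a', ha', c, _, hc⟩ := by
        simpa only [List.mem_flatMap, List.mem_map] using hx2
      have : a' = a := congrArg Prod.fst hc
      subst this
      exact (List.nodup_cons.1 hl).1 ha'

lemma pvPairs_eq (xs : List (String × List (String × String)))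
    (hk : (xs.map (fun p => p.1)).Nodup) :
    (pvTri xs).map (fun t => (t.1, t.2.1))
      = (xs.map (fun p => p.1)).flatMap (fun a => (pvF xs a).keys.map (fun k => (a, k))) := by
  rw [pvTri_eq xs hk, List.map_flatMap]
  congr 1
  funext a
  rw [List.map_map, PySem.Dict.keys, List.map_map]
  rfl

lemma pvPairs_nodup (xs : List (String × List (String × String)))
    (hk : (xs.map (fun p => p.1)).Nodup)
    (hin : ∀ p ∈ xs, (p.2.map (fun q => q.1)).Nodup) :
    ((pvTri xs).map (fun t => (t.1, t.2.1))).Nodup := by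
  rw [pvPairs_eq xs hk]
  exact pv_nodup_tag _ _ hk (fun a _ => pvF_keys_nodup xs hin a)

lemma pvTri_nodup (xs : List (String × List (String × String)))
    (hk : (xs.map (fun p => p.1)).Nodup)
    (hin : ∀ p ∈ xs, (p.2.map (fun q => q.1)).Nodup) : (pvTri xs).Nodup := by
  exact List.Nodup.of_map _ (pvPairs_nodup xs hk hin)

lemma pv_mem_pairs (xs : List (String × List (String × String)))
    (hk : (xs.map (fun p => p.1)).Nodup) (a k : String) :
    (a, k) ∈ (pvTri xs).map (fun t => (t.1, t.2.1)) ↔ k ∈ (pvF xs a).keys := by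
  rw [pvPairs_eq xs hk]
  simp only [List.mem_flatMap, List.mem_map]
  constructor
  · rintro ⟨a', ha', k', hk', h⟩
    obtain ⟨rfl, rfl⟩ : a' = a ∧ k' = k := ⟨congrArg Prod.fst h, congrArg Prod.snd h⟩
    exact hk'
  · intro h
    refine ⟨a, ?_, k, h, rfl⟩
    by_contra hmem0
    have hmem : a ∉ xs.map (fun p => p.1) := by simpa using hmem0
    have : (pvF xs a).items = [] := pvF_empty_of_not_mem xs a hmem
    rw [PySem.Dict.keys, this] at h
    simp at h

lemma pv_sum_superset (l L : List String) (t : String → Nat)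
    (hl : l.Nodup) (hL : L.Nodup) (hsub : ∀ a ∈ l, a ∈ L) (h0 : ∀ a, a ∉ l → t a = 0) :
    (L.map t).sum = (l.map t).sum := by
  have hperm := (List.filter_append_perm (fun a => decide (a ∈ l)) L).map t
  rw [← hperm.sum_eq, List.map_append, List.sum_append]
  have h2 : ((L.filter (fun a => !decide (a ∈ l))).map t).sum = 0 := by
    apply List.sum_eq_zero
    intro x hx
    obtain ⟨a, ha, rfl⟩ := List.mem_map.1 hx
    exact h0 a (by simpa using (List.mem_filter.1 ha).2)
  have h1 : (L.filter (fun a => decide (a ∈ l))).Perm l := by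
    apply (List.perm_ext_iff_of_nodup (hL.filter _) hl).2
    intro a
    simp only [List.mem_filter, decide_eq_true_eq]
    exact ⟨fun h => h.2, fun h => ⟨hsub a h, h⟩⟩
  rw [(h1.map t).sum_eq, h2, Nat.add_zero]

lemma pv_sum_map_sub (l : List String) (f g : String → Int) :
    (l.map (fun a => f a - g a)).sum = (l.map f).sum - (l.map g).sum := by
  induction l with
  | nil => simp
  | cons a l ih => simp [ih]; ring

def pvM (fs cs : List (String × List (String × String))) (a : String) : Nat :=
  List.countP (fun q => decide ((pvF cs a).get? q.1 = some q.2)) (pvF fs a).items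

def pvU (fs cs : List (String × List (String × String))) (a : String) : List String :=
  PySem.Set.union (PySem.Set.ofList (pvF fs a).keys) (pvF cs a).keys

lemma pvU_eq (fs cs : List (String × List (String × String))) (a : String)
    (hF : (pvF fs a).keys.Nodup) (hC : (pvF cs a).keys.Nodup) :
    pvU fs cs a = (pvF fs a).keys ++ (pvF cs a).keys.filter (fun k => !(PySem.Set.contains (pvF fs a).keys k)) := by
  unfold pvU PySem.Set.union
  rw [PySem.Set.ofList_eq_self_of_nodup _ hF, PySem.Set.update_eq_append_filter,
    PySem.Set.ofList_eq_self_of_nodup _ hC]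

lemma pv_perAgent (fs cs : List (String × List (String × String)))
    (hfin : ∀ p ∈ fs, (p.2.map (fun q => q.1)).Nodup)
    (hcin : ∀ p ∈ cs, (p.2.map (fun q => q.1)).Nodup) (a : String) :
    (List.countP (fun k => decide ((pvF fs a).get? k ≠ (pvF cs a).get? k)) (pvU fs cs a) : Int)
      = ((pvU fs cs a).length : Int) - (pvM fs cs a : Int) := by
  have hF := pvF_keys_nodup fs hfin a
  have hC := pvF_keys_nodup cs hcin a
  set F := pvF fs a with hFdef
  set C := pvF cs a with hCdef
  set p : String → Bool := fun k => decide (F.get? k = C.get? k) with hp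
  have hne : (fun k => decide (F.get? k ≠ C.get? k)) = fun k => decide ¬(p k = true) := by
    funext k; simp [hp]
  have hlen := List.length_eq_countP_add_countP (l := pvU fs cs a) (p := p)
  have hm : List.countP p (pvU fs cs a) = pvM fs cs a := by
    rw [pvU_eq fs cs a hF hC, List.countP_append]
    have h2 : List.countP p (C.keys.filter (fun k => !(PySem.Set.contains F.keys k))) = 0 := by
      rw [List.countP_eq_zero]
      intro k hk
      have hk1 : k ∈ C.keys := (List.mem_filter.1 hk).1
      have hk2 : k ∉ F.keys := by
        have := (List.mem_filter.1 hk).2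
        simpa using this
      have hFn : F.get? k = none := (PySem.Dict.get?_eq_none_iff_not_mem_keys F k).2 hk2
      have hCn : C.get? k ≠ none := fun h => (PySem.Dict.get?_eq_none_iff_not_mem_keys C k).1 h hk1
      simp [hp, hFn]
      exact fun h => hCn h.symm
    have h1 : List.countP p F.keys = pvM fs cs a := by
      unfold pvM
      rw [PySem.Dict.keys, List.countP_map]
      apply List.countP_congr
      intro q hq
      have : F.get? q.1 = some q.2 := PySem.Dict.get?_of_mem_items F hq hF
      simp only [Function.comp, hp, this]
      rw [decide_eq_true_eq, decide_eq_true_eq]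
      exact eq_comm
    rw [h1, h2, Nat.add_zero]
  rw [hne, ← hm]
  omega

def pvAgents (fs cs : List (String × List (String × String))) : List String :=
  PySem.Set.union (PySem.Set.ofList (PySem.Dict.mk fs).keys) (PySem.Dict.mk cs).keys

lemma pvAgents_def (fs cs : List (String × List (String × String))) :
    pvAgents fs cs = PySem.Set.union (PySem.Set.ofList (fs.map (fun p => p.1))) (cs.map (fun p => p.1)) := rfl

lemma pvAgents_nodup (fs cs : List (String × List (String × String))) : (pvAgents fs cs).Nodup :=
  PySem.Set.nodup_union _ _ (PySem.Set.nodup_ofList _)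

lemma pv_mem_agents_left (fs cs : List (String × List (String × String))) (a : String)
    (h : a ∈ fs.map (fun p => p.1)) : a ∈ pvAgents fs cs := by
  rw [pvAgents_def, PySem.Set.mem_union, PySem.Set.mem_ofList]
  exact Or.inl h

lemma pv_mem_agents_right (fs cs : List (String × List (String × String))) (a : String)
    (h : a ∈ cs.map (fun p => p.1)) : a ∈ pvAgents fs cs := by
  rw [pvAgents_def, PySem.Set.mem_union]
  exact Or.inr h

lemma pv_sum_map_add_nat (l : List String) (f g : String → Nat) :
    (l.map (fun a => f a + g a)).sum = (l.map f).sum + (l.map g).sum := by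
  induction l with
  | nil => simp
  | cons a l ih => simp [ih]; ring

lemma pv_sum_cast (l : List String) (t : String → Nat) :
    ((l.map (fun a => (t a : Int))).sum) = (((l.map t).sum : Nat) : Int) := by
  induction l with
  | nil => simp
  | cons a l ih => simp [ih]

lemma pv_contains_pairs (fs : List (String × List (String × String)))
    (hk : (fs.map (fun p => p.1)).Nodup) (a k : String) :
    PySem.Set.contains ((pvTri fs).map (fun t => (t.1, t.2.1))) (a, k)
      = PySem.Set.contains (pvF fs a).keys k := by
  rw [Bool.eq_iff_iff, PySem.Set.contains_iff, PySem.Set.contains_iff]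
  exact pv_mem_pairs fs hk a k

lemma pv_sum_fst (xs : List (String × List (String × String))) (L : List String) (t : String → Nat)
    (hl : (xs.map (fun p => p.1)).Nodup) (hL : L.Nodup)
    (hsub : ∀ a ∈ xs.map (fun p => p.1), a ∈ L)
    (h0 : ∀ a, a ∉ xs.map (fun p => p.1) → t a = 0) :
    (L.map t).sum = (xs.map (fun p => t p.1)).sum := by
  rw [pv_sum_superset _ L t hl hL hsub h0, List.map_map]
  rfl

lemma pv_keys_len (fs cs : List (String × List (String × String)))
    (h : ((fs.map (fun p => p.1)).Nodup ∧ ∀ p ∈ fs, (p.2.map (fun q => q.1)).Nodup) ∧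
         ((cs.map (fun p => p.1)).Nodup ∧ ∀ p ∈ cs, (p.2.map (fun q => q.1)).Nodup)) :
    (PySem.Set.union (PySem.Set.ofList ((pvTri fs).map (fun t => (t.1, t.2.1))))
        ((pvTri cs).map (fun t => (t.1, t.2.1)))).length
      = ((pvAgents fs cs).map (fun a => (pvU fs cs a).length)).sum := by
  obtain ⟨⟨hfk, hfin⟩, ⟨hck, hcin⟩⟩ := h
  unfold PySem.Set.union
  rw [PySem.Set.ofList_eq_self_of_nodup _ (pvPairs_nodup fs hfk hfin),
    PySem.Set.update_eq_append_filter,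
    PySem.Set.ofList_eq_self_of_nodup _ (pvPairs_nodup cs hck hcin),
    List.length_append]
  have hX : ((pvTri fs).map (fun t => (t.1, t.2.1))).length
      = ((pvAgents fs cs).map (fun a => (pvF fs a).keys.length)).sum := by
    rw [pvPairs_eq fs hfk, List.length_flatMap, List.map_map,
      List.map_congr_left (l := fs)
        (g := fun p => (pvF fs p.1).keys.length)
        (fun p _ => by simp [Function.comp])]
    refine (pv_sum_fst fs _ (fun a => (pvF fs a).keys.length) hfk (pvAgents_nodup fs cs) (pv_mem_agents_left fs cs) ?_).symm
    intro a ha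
    have h0 : (pvF fs a).items = [] := pvF_empty_of_not_mem fs a ha
    simp [PySem.Dict.keys, h0]
  have hY : (((pvTri cs).map (fun t => (t.1, t.2.1))).filter
        (fun y => !PySem.Set.contains ((pvTri fs).map (fun t => (t.1, t.2.1))) y)).length
      = ((pvAgents fs cs).map
          (fun a => ((pvF cs a).keys.filter (fun k => !(PySem.Set.contains (pvF fs a).keys k))).length)).sum := by
    rw [pvPairs_eq cs hck, List.filter_flatMap, List.length_flatMap, List.map_map,
      List.map_congr_left (l := cs)
        (g := fun p => ((pvF cs p.1).keys.filter (fun k => !(PySem.Set.contains (pvF fs p.1).keys k))).length)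
        (fun p _ => by
          simp only [Function.comp]
          rw [List.filter_map, List.length_map]
          congr 1
          apply List.filter_congr
          intro k _
          simp only [Function.comp]
          rw [pv_contains_pairs fs hfk])]
    refine (pv_sum_fst cs _ (fun a => ((pvF cs a).keys.filter (fun k => !(PySem.Set.contains (pvF fs a).keys k))).length) hck (pvAgents_nodup fs cs) (pv_mem_agents_right fs cs) ?_).symm
    intro a ha
    have h0 : (pvF cs a).items = [] := pvF_empty_of_not_mem cs a ha
    simp [PySem.Dict.keys, h0]
  rw [hX, hY, ← pv_sum_map_add_nat]
  refine congrArg List.sum (List.map_congr_left ?_)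
  intro a _
  rw [pvU_eq fs cs a (pvF_keys_nodup fs hfin a) (pvF_keys_nodup cs hcin a), List.length_append]

lemma pv_inter_len (fs cs : List (String × List (String × String)))
    (h : ((fs.map (fun p => p.1)).Nodup ∧ ∀ p ∈ fs, (p.2.map (fun q => q.1)).Nodup) ∧
         ((cs.map (fun p => p.1)).Nodup ∧ ∀ p ∈ cs, (p.2.map (fun q => q.1)).Nodup)) :
    (PySem.Set.inter (pvTri fs) (pvTri cs)).length
      = ((pvAgents fs cs).map (fun a => pvM fs cs a)).sum := by
  obtain ⟨⟨hfk, hfin⟩, ⟨hck, hcin⟩⟩ := h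
  unfold PySem.Set.inter
  rw [List.filter_congr (q := fun y => decide ((pvF cs y.1).get? y.2.1 = some y.2.2))
    (fun y _ => by
      rw [Bool.eq_iff_iff, PySem.Set.contains_iff, decide_eq_true_eq]
      exact pv_mem_tri cs hck hcin y)]
  rw [pvTri_eq fs hfk, List.filter_flatMap, List.length_flatMap, List.map_map,
    List.map_congr_left (l := fs) (g := fun p => pvM fs cs p.1)
      (fun p _ => by
        simp only [Function.comp]
        rw [List.filter_map, List.length_map, ← List.countP_eq_length_filter]
        unfold pvM
        apply List.countP_congr
        intro q _
        simp)]
  refine (pv_sum_fst fs _ (fun a => pvM fs cs a) hfk (pvAgents_nodup fs cs) (pv_mem_agents_left fs cs) ?_).symm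
  intro a ha
  have h0 : (pvF fs a).items = [] := pvF_empty_of_not_mem fs a ha
  simp only [pvM, h0, List.countP_nil]

lemma pv_A_eq (fs cs : List (String × List (String × String)))
    (h : ((fs.map (fun p => p.1)).Nodup ∧ ∀ p ∈ fs, (p.2.map (fun q => q.1)).Nodup) ∧
         ((cs.map (fun p => p.1)).Nodup ∧ ∀ p ∈ cs, (p.2.map (fun q => q.1)).Nodup)) :
    count_inherited_beliefs_py fs cs
      = (((pvAgents fs cs).map (fun a => ((pvU fs cs a).length : Int))).sum)
        - (((pvAgents fs cs).map (fun a => (pvM fs cs a : Int))).sum) := by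
  obtain ⟨⟨hfk, hfin⟩, ⟨hck, hcin⟩⟩ := h
  simp only [count_inherited_beliefs_py]
  have e1 : (fun (diffs : Int) (agent_id : String) =>
        (PySem.List.sorted (PySem.Set.union (PySem.Set.ofList (PySem.Dict.mk ((PySem.Dict.mk fs).getD agent_id [])).keys)
            (PySem.Dict.mk ((PySem.Dict.mk cs).getD agent_id [])).keys) (fun x => x) false).foldl
          (fun d claim_id =>
            if (PySem.Dict.mk ((PySem.Dict.mk fs).getD agent_id [])).get? claim_id ≠
                (PySem.Dict.mk ((PySem.Dict.mk cs).getD agent_id [])).get? claim_id then d + 1 else d)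
          diffs)
      = (fun (diffs : Int) (agent_id : String) => diffs +
          ((PySem.List.sorted (pvU fs cs agent_id) (fun x => x) false).countP
            (fun k => decide ((pvF fs agent_id).get? k ≠ (pvF cs agent_id).get? k)) : Int)) := by
    funext diffs agent_id
    exact PySem.List.foldl_ite_add_one _ _ _
  rw [e1, PySem.List.foldl_add, zero_add,
    show (PySem.Set.ofList (PySem.Dict.mk fs).keys).union (PySem.Dict.mk cs).keys = pvAgents fs cs from rfl]
  rw [List.map_congr_left (l := (PySem.List.sorted (pvAgents fs cs) (fun x => x) false))
    (g := fun a => ((pvU fs cs a).length : Int) - (pvM fs cs a : Int))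
    (fun a _ => by
      rw [(PySem.List.sorted_perm (pvU fs cs a) (fun x => x) false).countP_eq]
      exact pv_perAgent fs cs hfin hcin a)]
  rw [((PySem.List.sorted_perm (pvAgents fs cs) (fun x => x) false).map _).sum_eq]
  exact pv_sum_map_sub _ _ _

lemma pv_B_eq (fs cs : List (String × List (String × String)))
    (h : ((fs.map (fun p => p.1)).Nodup ∧ ∀ p ∈ fs, (p.2.map (fun q => q.1)).Nodup) ∧
         ((cs.map (fun p => p.1)).Nodup ∧ ∀ p ∈ cs, (p.2.map (fun q => q.1)).Nodup)) :
    count_inherited_beliefs_py_alt fs cs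
      = (((pvAgents fs cs).map (fun a => ((pvU fs cs a).length : Int))).sum)
        - (((pvAgents fs cs).map (fun a => (pvM fs cs a : Int))).sum) := by
  obtain ⟨⟨hfk, hfin⟩, ⟨hck, hcin⟩⟩ := h
  have e0 : count_inherited_beliefs_py_alt fs cs
      = ((PySem.Set.union (PySem.Set.ofList ((PySem.Set.ofList (pvTri fs)).map (fun t => (t.1, t.2.1))))
            ((PySem.Set.ofList (pvTri cs)).map (fun t => (t.1, t.2.1)))).length : Int)
        - ((PySem.Set.inter (PySem.Set.ofList (pvTri fs)) (PySem.Set.ofList (pvTri cs))).length : Int) := rfl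
  rw [e0, PySem.Set.ofList_eq_self_of_nodup _ (pvTri_nodup fs hfk hfin),
    PySem.Set.ofList_eq_self_of_nodup _ (pvTri_nodup cs hck hcin),
    pv_keys_len fs cs ⟨⟨hfk, hfin⟩, ⟨hck, hcin⟩⟩,
    pv_inter_len fs cs ⟨⟨hfk, hfin⟩, ⟨hck, hcin⟩⟩,
    pv_sum_cast, pv_sum_cast]

-- ===== VERDICT (by name: the statement is the Claim_ definition above) =====
theorem count_inherited_beliefs_py_spec : Claim_equal_count_inherited_beliefs_py := by
  intro fresh_start canon_start _ hpre
  unfold Spec_count_inherited_beliefs_py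
  unfold Pre_count_inherited_beliefs_py at hpre
  rw [pv_A_eq fresh_start canon_start hpre, pv_B_eq fresh_start canon_start hpre]
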